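-- pv_equiv track=rewrite | github.com/xzawyibo/duckdb | postgresql-16.1/contrib/pg_duckdb_translator1/tools/normalize_plan.py | parse_structured_node_content
-- ===== SOURCE A (Python) =====
-- def parse_structured_node_content(content_lines):
--     """Parse a node's content lines into structured fields.
--     Returns dict with keys depending on node type: expressions, groups, filters, table_info.
--     """
--     node = {'expressions': [], 'groups': [], 'filters': [], 'table': None, 'other': []}
--     i = 0
--     while i < len(content_lines):
--         l = content_lines[i]
--         # detect groups
--         if l.startswith('Groups:'):
--             i += 1
--             while i < len(content_lines) and content_lines[i] and not content_lines[i].endswith(':'):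
--                 node['groups'].append(content_lines[i])
--                 i += 1
--             continue
--         # detect expressions
--         if l == 'Expressions:' or l.startswith('Expressions'):
--             i += 1
--             while i < len(content_lines) and content_lines[i] and not content_lines[i].endswith(':'):
--                 node['expressions'].append(content_lines[i])
--                 i += 1
--             continue
--         # detect filters or file filters
--         if l.startswith('Filters:') or l.startswith('File Filters:'):
--             # consume remaining lines as filter block
--             i += 1
--             while i < len(content_lines) and content_lines[i]:
--                 node['filters'].append(content_lines[i])
--                 i += 1
--             continue
--         # detect table info lines
--         if l.startswith('Table:') or l.startswith('Type:'):
--             if node['table'] is None: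
--                 node['table'] = []
--             node['table'].append(l)
--             i += 1
--             continue
--         # otherwise other
--         node['other'].append(l)
--         i += 1
--     return node
-- ===== SOURCE B (Python) =====
-- def parse_structured_node_content(content_lines):
--     """Single flat pass with a mode variable instead of an index with nested inner loops."""
--     expressions = []
--     groups = []
--     filters = []
--     table = None
--     other = []
--     mode = None
--     for l in content_lines:
--         while True:
--             if mode == 'groups' or mode == 'expressions':
--                 if l and not l.endswith(':'):
--                     (groups if mode == 'groups' else expressions).append(l)
--                     break
--                 mode = None
--                 continue
--             if mode == 'filters':
--                 if l:
--                     filters.append(l)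
--                     break
--                 mode = None
--                 continue
--             if l.startswith('Groups:'):
--                 mode = 'groups'
--                 break
--             if l.startswith('Expressions'):
--                 mode = 'expressions'
--                 break
--             if l.startswith('Filters:') or l.startswith('File Filters:'):
--                 mode = 'filters'
--                 break
--             if l.startswith('Table:') or l.startswith('Type:'):
--                 if table is None:
--                     table = []
--                 table.append(l)
--                 break
--             other.append(l)
--             break
--     return {'expressions': expressions, 'groups': groups, 'filters': filters,
--             'table': table, 'other': other}
-- ===== Notes on version B (the rewrite author's own statement) =====
-- stated objective: simpler
-- what changed: Replaced the index-driven while-loop with nested inner block-consuming while-loops by a single flat for-pass over the lines that carries a mode variable and re-examines a block-terminating line as a potential header via a tiny while-True/continue.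
import Mathlib
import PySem

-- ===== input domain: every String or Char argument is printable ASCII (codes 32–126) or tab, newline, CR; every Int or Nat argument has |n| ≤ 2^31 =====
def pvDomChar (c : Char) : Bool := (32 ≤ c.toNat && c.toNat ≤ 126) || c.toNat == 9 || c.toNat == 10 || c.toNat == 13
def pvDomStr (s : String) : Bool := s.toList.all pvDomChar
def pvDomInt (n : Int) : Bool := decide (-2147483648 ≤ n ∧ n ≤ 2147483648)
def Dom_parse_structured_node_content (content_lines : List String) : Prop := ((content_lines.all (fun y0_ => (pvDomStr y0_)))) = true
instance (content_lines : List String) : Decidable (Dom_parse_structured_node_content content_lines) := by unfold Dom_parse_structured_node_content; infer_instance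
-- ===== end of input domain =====

-- B replaces A's index loop with nested inner while-loops by one flat pass carrying a mode variable (objective: simpler decomposition, same result).

-- the mutable dict 'node' of both Pythons, as a record
structure PvSt where
  expressions : List String
  groups : List String
  filters : List String
  table : Option (List String)
  other : List String
deriving Repr, DecidableEq

-- ===== PORT A =====
-- A's inner while for Groups/Expressions blocks: consume while non-empty and not ending ':'
def pvTakeGE : List String → List String × List String
  | [] => ([], [])
  | l :: rest =>
    if l ≠ "" ∧ ¬ (PySem.Str.endswith l ":") then
      let p := pvTakeGE rest
      (l :: p.1, p.2)
    else ([], l :: rest)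

-- A's inner while for Filters blocks: consume while non-empty
def pvTakeF : List String → List String × List String
  | [] => ([], [])
  | l :: rest =>
    if l ≠ "" then
      let p := pvTakeF rest
      (l :: p.1, p.2)
    else ([], l :: rest)

theorem pvTakeGE_len (ls : List String) : (pvTakeGE ls).2.length ≤ ls.length := by
  induction ls with
  | nil => simp [pvTakeGE]
  | cons l rest ih =>
    simp only [pvTakeGE]
    split
    · simpa using Nat.le_succ_of_le ih
    · simp

theorem pvTakeF_len (ls : List String) : (pvTakeF ls).2.length ≤ ls.length := by
  induction ls with
  | nil => simp [pvTakeF]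
  | cons l rest ih =>
    simp only [pvTakeF]
    split
    · simpa using Nat.le_succ_of_le ih
    · simp

-- A's outer while over the index i, as recursion on the remaining lines
def pvLoopA : List String → PvSt → PvSt
  | [], st => st
  | l :: rest, st =>
    if PySem.Str.startswith l "Groups:" then
      let p := pvTakeGE rest
      pvLoopA p.2 { st with groups := st.groups ++ p.1 }
    else if l = "Expressions:" ∨ PySem.Str.startswith l "Expressions" then
      let p := pvTakeGE rest
      pvLoopA p.2 { st with expressions := st.expressions ++ p.1 }
    else if PySem.Str.startswith l "Filters:" ∨ PySem.Str.startswith l "File Filters:" then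
      let p := pvTakeF rest
      pvLoopA p.2 { st with filters := st.filters ++ p.1 }
    else if PySem.Str.startswith l "Table:" ∨ PySem.Str.startswith l "Type:" then
      pvLoopA rest { st with table := some ((st.table.getD []) ++ [l]) }
    else
      pvLoopA rest { st with other := st.other ++ [l] }
termination_by ls => ls.length
decreasing_by
  · exact Nat.lt_succ_of_le (pvTakeGE_len rest)
  · exact Nat.lt_succ_of_le (pvTakeGE_len rest)
  · exact Nat.lt_succ_of_le (pvTakeF_len rest)
  · exact Nat.lt_succ_of_le (Nat.le_refl _)
  · exact Nat.lt_succ_of_le (Nat.le_refl _)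

def pvRender (st : PvSt) : List (String × Option (List String)) :=
  [("expressions", some st.expressions), ("groups", some st.groups),
   ("filters", some st.filters), ("table", st.table), ("other", some st.other)]

def parse_structured_node_content (content_lines : List String) : List (String × Option (List String)) :=
  pvRender (pvLoopA content_lines ⟨[], [], [], none, []⟩)

-- ===== PORT B =====
-- B's header dispatch (the mode-None branches of the while-True)
def pvHeader (l : String) (st : PvSt) : Option String × PvSt :=
  if PySem.Str.startswith l "Groups:" then (some "groups", st)
  else if PySem.Str.startswith l "Expressions" then (some "expressions", st)
  else if PySem.Str.startswith l "Filters:" ∨ PySem.Str.startswith l "File Filters:" then (some "filters", st)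
  else if PySem.Str.startswith l "Table:" ∨ PySem.Str.startswith l "Type:" then
    (none, { st with table := some ((st.table.getD []) ++ [l]) })
  else (none, { st with other := st.other ++ [l] })

-- B's while-True body for one line: continuation test in a bucket mode, else reset to header dispatch
def pvStep (l : String) (mode : Option String) (st : PvSt) : Option String × PvSt :=
  match mode with
  | some m =>
    if m = "groups" ∨ m = "expressions" then
      if l ≠ "" ∧ ¬ (PySem.Str.endswith l ":") then
        (some m, if m = "groups" then { st with groups := st.groups ++ [l] }
                 else { st with expressions := st.expressions ++ [l] })
      else pvHeader l st
    else if l ≠ "" then (some m, { st with filters := st.filters ++ [l] })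
    else pvHeader l st
  | none => pvHeader l st

-- B's flat for-loop
def pvFoldB : List String → Option String → PvSt → PvSt
  | [], _, st => st
  | l :: rest, mode, st =>
    let p := pvStep l mode st
    pvFoldB rest p.1 p.2

def parse_structured_node_content_alt (content_lines : List String) : List (String × Option (List String)) :=
  pvRender (pvFoldB content_lines none ⟨[], [], [], none, []⟩)

-- ===== PRECONDITION & SPEC =====
def Spec_parse_structured_node_content (content_lines : List String) (out : List (String × Option (List String))) : Prop := out = parse_structured_node_content_alt content_lines
instance (content_lines : List String) (out : List (String × Option (List String))) : Decidable (Spec_parse_structured_node_content content_lines out) := by unfold Spec_parse_structured_node_content; infer_instance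

-- ===== CLAIM (what is proved, stated in full; the proofs are below) =====
def Claim_equal_parse_structured_node_content : Prop := ∀ (content_lines : List String), Dom_parse_structured_node_content content_lines → Spec_parse_structured_node_content content_lines (parse_structured_node_content content_lines)

-- ===== LEMMAS AND PROOFS =====

theorem pvFoldB_groups (ls : List String) (st : PvSt) :
    pvFoldB ls (some "groups") st
      = pvFoldB (pvTakeGE ls).2 none { st with groups := st.groups ++ (pvTakeGE ls).1 } := by
  induction ls generalizing st with
  | nil => simp [pvTakeGE, pvFoldB]
  | cons l rest ih =>
    by_cases h : l ≠ "" ∧ ¬ (PySem.Str.endswith l ":")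
    · simp only [pvTakeGE, pvFoldB, pvStep, if_pos h]
      simp only [String.reduceEq, true_or, if_true]
      rw [ih]
      simp
    · simp only [pvTakeGE, pvFoldB, pvStep, if_neg h]
      simp

theorem pvFoldB_exprs (ls : List String) (st : PvSt) :
    pvFoldB ls (some "expressions") st
      = pvFoldB (pvTakeGE ls).2 none { st with expressions := st.expressions ++ (pvTakeGE ls).1 } := by
  induction ls generalizing st with
  | nil => simp [pvTakeGE, pvFoldB]
  | cons l rest ih =>
    by_cases h : l ≠ "" ∧ ¬ (PySem.Str.endswith l ":")
    · simp only [pvTakeGE, pvFoldB, pvStep, if_pos h]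
      simp only [String.reduceEq, or_true, if_true, reduceIte]
      rw [ih]
      simp
    · simp only [pvTakeGE, pvFoldB, pvStep, if_neg h]
      simp

theorem pvFoldB_filters (ls : List String) (st : PvSt) :
    pvFoldB ls (some "filters") st
      = pvFoldB (pvTakeF ls).2 none { st with filters := st.filters ++ (pvTakeF ls).1 } := by
  induction ls generalizing st with
  | nil => simp [pvTakeF, pvFoldB]
  | cons l rest ih =>
    by_cases h : l ≠ ""
    · simp only [pvTakeF, pvFoldB, pvStep, if_pos h]
      simp only [String.reduceEq, or_self, if_false]
      rw [ih]
      simp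
    · simp only [pvTakeF, pvFoldB, pvStep, if_neg h]
      simp

theorem pvLoopA_eq_foldB (n : Nat) : ∀ (ls : List String), ls.length ≤ n → ∀ (st : PvSt),
    pvLoopA ls st = pvFoldB ls none st := by
  induction n with
  | zero =>
    intro ls hls st
    have : ls = [] := List.eq_nil_of_length_eq_zero (Nat.le_zero.mp hls)
    subst this
    simp [pvLoopA, pvFoldB]
  | succ n ih =>
    intro ls hls st
    match ls with
    | [] => simp [pvLoopA, pvFoldB]
    | l :: rest =>
      have hrest : rest.length ≤ n := Nat.succ_le_succ_iff.mp hls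
      rw [pvLoopA]
      by_cases h1 : PySem.Str.startswith l "Groups:"
      · rw [if_pos h1, ih _ (le_trans (pvTakeGE_len rest) hrest)]
        simp only [pvFoldB, pvStep, pvHeader, if_pos h1]
        rw [pvFoldB_groups]
      · rw [if_neg h1]
        by_cases h2 : l = "Expressions:" ∨ PySem.Str.startswith l "Expressions"
        · have h2' : PySem.Str.startswith l "Expressions" := by
            rcases h2 with h2 | h2
            · subst h2; decide
            · exact h2
          rw [if_pos h2, ih _ (le_trans (pvTakeGE_len rest) hrest)]
          simp only [pvFoldB, pvStep, pvHeader, if_neg h1, if_pos h2']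
          rw [pvFoldB_exprs]
        · have h2' : ¬ PySem.Str.startswith l "Expressions" := by
            intro hc; exact h2 (Or.inr hc)
          rw [if_neg h2]
          by_cases h3 : PySem.Str.startswith l "Filters:" ∨ PySem.Str.startswith l "File Filters:"
          · rw [if_pos h3, ih _ (le_trans (pvTakeF_len rest) hrest)]
            simp only [pvFoldB, pvStep, pvHeader, if_neg h1, if_neg h2', if_pos h3]
            rw [pvFoldB_filters]
          · rw [if_neg h3]
            by_cases h4 : PySem.Str.startswith l "Table:" ∨ PySem.Str.startswith l "Type:"
            · rw [if_pos h4, ih _ hrest]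
              simp only [pvFoldB, pvStep, pvHeader, if_neg h1, if_neg h2', if_neg h3, if_pos h4]
            · rw [if_neg h4, ih _ hrest]
              simp only [pvFoldB, pvStep, pvHeader, if_neg h1, if_neg h2', if_neg h3, if_neg h4]

-- ===== VERDICT (by name: the statement is the Claim_ definition above) =====
theorem parse_structured_node_content_spec : Claim_equal_parse_structured_node_content := by
  intro content_lines _
  unfold Spec_parse_structured_node_content parse_structured_node_content parse_structured_node_content_alt
  rw [pvLoopA_eq_foldB content_lines.length content_lines (Nat.le_refl _)]
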